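-- pv_equiv track=rewrite | github.com/bsicay/Cifrados-UVG | ejercicios/cifrados/base64_to_bin.py | base64_to_binary
-- ===== SOURCE A (Python) =====
-- def base64_to_binary(b64_string):
--     """
--     Decodifica una cadena en Base64 y devuelve su contenido en binario (bits) como una cadena.
--     Procesa manualmente los caracteres, sin utilizar librerías.
--     """
--
--     # Tabla de caracteres Base64 estándar y su índice (0..63)
--     base64_chars = "ABCDEFGHIJKLMNOPQRSTUVWXYZabcdefghijklmnopqrstuvwxyz0123456789+/"
--
--     # Contar cuántos '=' hay (padding)
--     padding_count = b64_string.count('=')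
--
--     # Eliminar los '=' para poder mapear los caracteres a bits
--     b64_string = b64_string.replace('=', '')
--
--     # 1) Convertir cada carácter Base64 en 6 bits
--     bit_string = ""
--     for ch in b64_string:
--         # Obtener el índice (valor entre 0..63)
--         val_6_bits = base64_chars.index(ch)
--         # Convertirlo a binario de 6 bits y concatenar
--         bit_string += f"{val_6_bits:06b}"
--
--     return bit_string
-- ===== SOURCE B (Python) =====
-- def base64_to_binary(b64_string):
--     """
--     Decodifica una cadena Base64 a una cadena de bits.
--     Acumula todos los caracteres en un solo entero y lo formatea una vez.
--     """
--     base64_chars = "ABCDEFGHIJKLMNOPQRSTUVWXYZabcdefghijklmnopqrstuvwxyz0123456789+/"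
--     stripped = b64_string.replace('=', '')
--     total = 0
--     for ch in stripped:
--         total = total * 64 + base64_chars.index(ch)
--     if not stripped:
--         return ''
--     return format(total, '0{}b'.format(6 * len(stripped)))
-- ===== Notes on version B (the rewrite author's own statement) =====
-- stated objective: alternative
-- what changed: Instead of formatting each character's 6-bit index and concatenating strings, B folds all indices into one big integer (total = total*64 + index) and formats that integer once, zero-padded to 6 bits per character; this trades large-input speed (the big-int fold is quadratic in bits) for a single-format decomposition.
import Mathlib
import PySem

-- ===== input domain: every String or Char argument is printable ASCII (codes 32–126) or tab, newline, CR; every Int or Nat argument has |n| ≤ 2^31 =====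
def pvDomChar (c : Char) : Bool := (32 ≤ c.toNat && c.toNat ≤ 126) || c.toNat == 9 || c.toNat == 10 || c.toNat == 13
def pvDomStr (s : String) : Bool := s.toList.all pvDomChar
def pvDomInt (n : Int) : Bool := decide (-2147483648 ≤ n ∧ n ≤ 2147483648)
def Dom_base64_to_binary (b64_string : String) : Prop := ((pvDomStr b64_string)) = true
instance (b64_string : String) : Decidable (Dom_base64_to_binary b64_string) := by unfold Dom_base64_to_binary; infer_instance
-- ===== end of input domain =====

-- B folds the whole stripped string into one big integer and formats it once instead of
-- formatting 6 bits per character and concatenating (objective: alternative decomposition;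
-- not faster: the big-int fold grows quadratically on very long inputs).

-- The Base64 alphabet literal both Python versions share.
def pvB64 : List Char :=
  "ABCDEFGHIJKLMNOPQRSTUVWXYZabcdefghijklmnopqrstuvwxyz0123456789+/".toList

-- ===== PORT A =====
-- A's loop: per character look up the index and append its 6-bit binary representation.
-- f"{v:06b}" (v ≥ 0) is ported as zero-fill-to-6 of format(v,'b'): PySem.Chars.zfill (toBinChars v) 6.
-- `none` = the ValueError `.index` raises on a character outside the alphabet (excluded by Pre_).
def pvLoopA : List Char → List Char → Option (List Char)
  | acc, [] => some acc
  | acc, c :: rest =>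
    match PySem.List.index? pvB64 c with
    | none => none
    | some v => pvLoopA (acc ++ PySem.Chars.zfill (PySem.Int.toBinChars (v : Int)) 6) rest

def base64_to_binary (b64_string : String) : String :=
  let _padding_count := PySem.Str.count b64_string "="   -- computed and unused, as in A
  let stripped := PySem.Str.replace b64_string "=" ""
  match pvLoopA [] stripped.toList with
  | some bits => String.ofList bits
  | none => ""   -- unreachable under Pre_ (A raises ValueError here)

-- ===== PORT B =====
-- B's loop: total = total*64 + index(ch); `none` = the same ValueError (excluded by Pre_).
def pvLoopB : Nat → List Char → Option Nat
  | t, [] => some t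
  | t, c :: rest =>
    match PySem.List.index? pvB64 c with
    | none => none
    | some v => pvLoopB (t * 64 + v) rest

def base64_to_binary_alt (b64_string : String) : String :=
  let stripped := PySem.Str.replace b64_string "=" ""
  match pvLoopB 0 stripped.toList with
  | none => ""   -- unreachable under Pre_ (B raises ValueError here)
  | some total =>
    if stripped.toList = [] then ""
    -- format(total, '0{}b'.format(6*n)) = zero-fill format(total,'b') to width 6*n
    else String.ofList (PySem.Chars.zfill (PySem.Int.toBinChars (total : Int))
                      ((6 * stripped.toList.length : Nat) : Int))

-- ===== PRECONDITION & SPEC =====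
-- Pre_ excludes exactly the inputs that still contain, after padding removal, a character
-- outside the Base64 alphabet: there `.index` raises ValueError in both A and B.
def Pre_base64_to_binary (b64_string : String) : Prop :=
  ((PySem.Str.replace b64_string "=" "").toList.all (fun c => pvB64.contains c)) = true

instance (b64_string : String) : Decidable (Pre_base64_to_binary b64_string) := by
  unfold Pre_base64_to_binary; infer_instance

def pvWitness_base64_to_binary : String := "TWFu"

def Spec_base64_to_binary (b64_string : String) (out : String) : Prop := out = base64_to_binary_alt b64_string
instance (b64_string : String) (out : String) : Decidable (Spec_base64_to_binary b64_string out) := by unfold Spec_base64_to_binary; infer_instance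

-- ===== CLAIM (what is proved, stated in full; the proofs are below) =====
def Claim_equal_base64_to_binary : Prop := ∀ (b64_string : String), Dom_base64_to_binary b64_string → Pre_base64_to_binary b64_string → Spec_base64_to_binary b64_string (base64_to_binary b64_string)

-- ===== LEMMAS AND PROOFS =====

-- Minimal binary digits of n (msb first, [] for 0).
def pvBits : Nat → List Char
  | 0 => []
  | n + 1 => pvBits ((n + 1) / 2) ++ [if (n + 1) % 2 = 1 then '1' else '0']
decreasing_by exact Nat.div_lt_self (Nat.succ_pos n) (by norm_num)

-- format(n,'b') for n ≥ 0: minimal digits, '0' for 0.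
def pvBinrep (n : Nat) : List Char := if n = 0 then ['0'] else pvBits n

-- Fixed-width (w) binary digits of n, msb first.
def pvBitsFix : Nat → Nat → List Char
  | 0, _ => []
  | w + 1, n => pvBitsFix w (n / 2) ++ [if n % 2 = 1 then '1' else '0']

theorem pvToDigitsCore_eq (f : Nat) : ∀ n ds, n < f →
    Nat.toDigitsCore 2 f n ds = pvBinrep n ++ ds := by
  induction f with
  | zero => intro n ds h; omega
  | succ f ih =>
    intro n ds h
    by_cases h0 : n / 2 = 0
    · have hn2 : n < 2 := by omega
      interval_cases n <;>
        simp [Nat.toDigitsCore, pvBinrep, pvBits, Nat.digitChar]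
    · rw [Nat.toDigitsCore]
      simp only [h0, if_false]
      rw [ih (n / 2) _ (by omega)]
      have hn : n ≠ 0 := by omega
      obtain ⟨m, rfl⟩ : ∃ m, n = m + 1 := ⟨n - 1, by omega⟩
      have hrep : pvBinrep (m + 1) =
          pvBinrep ((m + 1) / 2) ++ [if (m + 1) % 2 = 1 then '1' else '0'] := by
        rw [pvBinrep, if_neg hn, pvBits]
        congr 1
        rw [pvBinrep, if_neg h0]
      rw [hrep, List.append_assoc]
      congr 1
      rcases Nat.mod_two_eq_zero_or_one (m + 1) with hp | hp <;>
        simp [hp, Nat.digitChar]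

theorem pvToBinChars_nat (n : Nat) :
    PySem.Int.toBinChars (n : Int) = pvBinrep n := by
  rw [PySem.Int.toBinChars]
  rw [if_neg (by omega)]
  show Nat.toDigits 2 (Int.toNat n) = _
  rw [Int.toNat_natCast, Nat.toDigits]
  rw [pvToDigitsCore_eq (n + 1) n [] (by omega), List.append_nil]

theorem pvBinrep_mem (n : Nat) : ∀ c ∈ pvBinrep n, c = '0' ∨ c = '1' := by
  induction n using Nat.strong_induction_on with
  | _ n ih =>
    intro c hc
    rw [pvBinrep] at hc
    by_cases h0 : n = 0
    · simp [h0] at hc; simp [hc]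
    · rw [if_neg h0] at hc
      obtain ⟨m, rfl⟩ : ∃ m, n = m + 1 := ⟨n - 1, by omega⟩
      rw [pvBits] at hc
      rcases List.mem_append.1 hc with h | h
      · by_cases hq : (m + 1) / 2 = 0
        · rw [hq] at h; simp [pvBits] at h
        · have := ih ((m + 1) / 2) (by omega) c
          rw [pvBinrep, if_neg hq] at this
          exact this h
      · rcases List.mem_singleton.1 h with rfl
        split <;> simp

theorem pvBinrep_ne_nil (n : Nat) : pvBinrep n ≠ [] := by
  rw [pvBinrep]
  by_cases h0 : n = 0
  · simp [h0]
  · rw [if_neg h0]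
    obtain ⟨m, rfl⟩ : ∃ m, n = m + 1 := ⟨n - 1, by omega⟩
    rw [pvBits]; simp

theorem pvZfill_pad (cs : List Char) (hne : cs ≠ [])
    (hh : ∀ c ∈ cs, c = '0' ∨ c = '1') (w : Nat) :
    PySem.Chars.zfill cs (w : Int) = List.replicate (w - cs.length) '0' ++ cs := by
  rw [PySem.Chars.zfill.eq_def]
  by_cases hle : (w : Int) ≤ (cs.length : Int)
  · rw [if_pos hle]
    have : w - cs.length = 0 := by omega
    simp [this]
  · rw [if_neg hle]
    cases cs with
    | nil => exact absurd rfl hne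
    | cons c rest =>
      have hc := hh c List.mem_cons_self
      have : ¬ (c = '+' ∨ c = '-') := by rcases hc with rfl | rfl <;> decide
      simp only [this, if_false, Int.toNat_natCast]

theorem pvBitsFix_zero (w : Nat) : pvBitsFix w 0 = List.replicate w '0' := by
  induction w with
  | zero => rfl
  | succ w ih => rw [pvBitsFix]; simp [ih, List.replicate_succ']

theorem pvBitsFix_length (w : Nat) : ∀ n, (pvBitsFix w n).length = w := by
  induction w with
  | zero => intro n; rfl
  | succ w ih => intro n; rw [pvBitsFix]; simp [ih]

theorem pvPad_binrep (w : Nat) : ∀ n, n < 2 ^ w → 0 < w →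
    List.replicate (w - (pvBinrep n).length) '0' ++ pvBinrep n = pvBitsFix w n := by
  induction w with
  | zero => omega
  | succ w ih =>
    intro n hn _
    by_cases h0 : n = 0
    · subst h0
      rw [pvBinrep, if_pos rfl, pvBitsFix_zero]
      simp [List.replicate_succ']
    · obtain ⟨m, rfl⟩ : ∃ m, n = m + 1 := ⟨n - 1, by omega⟩
      rw [pvBinrep, if_neg h0, pvBits, pvBitsFix]
      by_cases hq : (m + 1) / 2 = 0
      · have hm0 : m = 0 := by omega
        subst hm0
        rw [hq, pvBitsFix_zero]
        norm_num [pvBits, List.replicate_succ']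
      · have hw : 0 < w := by
          by_contra hww
          have : w = 0 := by omega
          subst this
          omega
        have := ih ((m + 1) / 2) (by omega) hw
        rw [pvBinrep, if_neg hq] at this
        have hlen : (pvBits ((m + 1) / 2)).length ≤ w := by
          have hl := congrArg List.length this
          simp only [List.length_append, List.length_replicate,
            pvBitsFix_length] at hl
          omega
        rw [← List.append_assoc, ← this]
        have h4 : w + 1 - (pvBits ((m + 1) / 2) ++
            [if (m + 1) % 2 = 1 then '1' else '0']).length
            = w - (pvBits ((m + 1) / 2)).length := by
          simp only [List.length_append, List.length_cons, List.length_nil]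
          omega
        rw [h4]

theorem pvFmt_eq (n w : Nat) (h : n < 2 ^ w) (hw : 0 < w) :
    PySem.Chars.zfill (PySem.Int.toBinChars (n : Int)) (w : Int) = pvBitsFix w n := by
  rw [pvToBinChars_nat, pvZfill_pad _ (pvBinrep_ne_nil n) (pvBinrep_mem n) w,
    pvPad_binrep w n h hw]

theorem pvBitsFix_append (k : Nat) : ∀ w a b, b < 2 ^ k →
    pvBitsFix (w + k) (a * 2 ^ k + b) = pvBitsFix w a ++ pvBitsFix k b := by
  induction k with
  | zero =>
    intro w a b hb
    norm_num at hb
    subst hb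
    simp [pvBitsFix]
  | succ k ih =>
    intro w a b hb
    have h1 : w + (k + 1) = (w + k) + 1 := by omega
    rw [h1, pvBitsFix, pvBitsFix, pow_succ, ← mul_assoc]
    have hb' : b < 2 ^ k * 2 := by rw [pow_succ] at hb; exact hb
    have h2 : (a * 2 ^ k * 2 + b) / 2 = a * 2 ^ k + b / 2 := by omega
    have h3 : (a * 2 ^ k * 2 + b) % 2 = b % 2 := by omega
    rw [h2, h3, ih w a (b / 2) (by omega), List.append_assoc]

-- The pure value of B's fold once every character is in the alphabet.
def pvTot : Nat → List Char → Nat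
  | t, [] => t
  | t, c :: rest => pvTot (t * 64 + (PySem.List.index? pvB64 c).getD 0) rest

theorem pvKey (cs : List Char) : ∀ t w, (∀ c ∈ cs, c ∈ pvB64) → t < 2 ^ w →
    pvLoopA (pvBitsFix w t) cs = some (pvBitsFix (w + 6 * cs.length) (pvTot t cs)) ∧
    pvLoopB t cs = some (pvTot t cs) ∧ pvTot t cs < 2 ^ (w + 6 * cs.length) := by
  induction cs with
  | nil => intro t w _ ht; simp [pvLoopA, pvLoopB, pvTot, ht]
  | cons c rest ih =>
    intro t w hmem ht
    have hc : c ∈ pvB64 := hmem c List.mem_cons_self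
    obtain ⟨v, hv⟩ := Option.isSome_iff_exists.1 ((PySem.List.index?_isSome_iff pvB64 c).2 hc)
    obtain ⟨hk, -, -⟩ := PySem.List.getElem_of_index?_eq_some hv
    have hv64 : v < 64 := by
      have : pvB64.length = 64 := by decide
      omega
    have hstep : t * 64 + v < 2 ^ (w + 6) := by
      have : 2 ^ (w + 6) = 2 ^ w * 64 := by rw [pow_add]; norm_num
      omega
    have ih' := ih (t * 64 + v) (w + 6) (fun d hd => hmem d (List.mem_cons_of_mem c hd)) hstep
    refine ⟨?_, ?_, ?_⟩
    · simp only [pvLoopA, hv]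
      have hfmt : PySem.Chars.zfill (PySem.Int.toBinChars (v : Int)) 6 = pvBitsFix 6 v := by
        have := pvFmt_eq v 6 (by omega) (by omega)
        simpa using this
      rw [hfmt, ← pvBitsFix_append 6 w t v (by omega)]
      have harith : w + 6 * (c :: rest).length = (w + 6) + 6 * rest.length := by
        simp [List.length_cons]; omega
      rw [harith]
      have htot : pvTot t (c :: rest) = pvTot (t * 64 + v) rest := by
        simp only [pvTot, hv, Option.getD_some]
      rw [htot]
      exact ih'.1
    · simp only [pvLoopB, hv]
      have htot : pvTot t (c :: rest) = pvTot (t * 64 + v) rest := by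
        simp only [pvTot, hv, Option.getD_some]
      rw [htot]
      exact ih'.2.1
    · have htot : pvTot t (c :: rest) = pvTot (t * 64 + v) rest := by
        simp only [pvTot, hv, Option.getD_some]
      rw [htot]
      have harith : w + 6 * (c :: rest).length = (w + 6) + 6 * rest.length := by
        simp [List.length_cons]; omega
      rw [harith]
      exact ih'.2.2

-- ===== VERDICT (by name: the statement is the Claim_ definition above) =====
set_option maxHeartbeats 1000000 in
theorem base64_to_binary_spec : Claim_equal_base64_to_binary := by
  intro s _ hpre
  unfold Spec_base64_to_binary
  have hpre' : ∀ c ∈ (PySem.Str.replace s "=" "").toList, c ∈ pvB64 := by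
    intro c hc
    have := List.all_eq_true.1 hpre c hc
    simpa using this
  have hkey := pvKey ((PySem.Str.replace s "=" "").toList) 0 0 hpre' (by norm_num)
  have hA : pvLoopA [] (PySem.Str.replace s "=" "").toList =
      some (pvBitsFix (6 * (PySem.Str.replace s "=" "").toList.length)
        (pvTot 0 (PySem.Str.replace s "=" "").toList)) := by
    simpa [pvBitsFix] using hkey.1
  have hB : pvLoopB 0 (PySem.Str.replace s "=" "").toList =
      some (pvTot 0 (PySem.Str.replace s "=" "").toList) := hkey.2.1
  simp only [base64_to_binary, base64_to_binary_alt, hA, hB]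
  by_cases hnil : (PySem.Str.replace s "=" "").toList = []
  · simp [hnil, pvBitsFix]
  · simp only [hnil, if_false]
    congr 1
    have hpos : 0 < 6 * (PySem.Str.replace s "=" "").toList.length := by
      have : (PySem.Str.replace s "=" "").toList.length ≠ 0 :=
        fun h => hnil (List.length_eq_zero_iff.1 h)
      omega
    have hbound : pvTot 0 (PySem.Str.replace s "=" "").toList <
        2 ^ (6 * (PySem.Str.replace s "=" "").toList.length) := by
      simpa using hkey.2.2
    rw [pvFmt_eq _ _ hbound hpos]
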